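-- pv_equiv track=rewrite | github.com/Y-point/Geo-MOEA | Geo_MOEA/L-SRR/PO.py | find_prefix4
-- ===== SOURCE A (Python) =====
-- def find_prefix4(current_position, data):
-- 	prefix = 44
-- 	count_list=[]
-- 	dif_list=[]
-- 	pre_list=[]
-- 	while True:
-- 		count = 0
-- 		for other in data:
-- 			match_count = 0
-- 			for i in range(prefix):
-- 				if current_position[i] == other[i]:
-- 					match_count += 1
-- 				else:
-- 					break
--
-- 				if match_count >= prefix:
-- 					break
-- 			if match_count >= prefix:
-- 				count += 1
-- 		pre_list.append(prefix)
-- 		count_list.append(count)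
-- 		dif_list.append(abs(153-count))
-- 		if prefix<=2:
-- 			return pre_list[dif_list.index(min(dif_list))],count_list[dif_list.index(min(dif_list))]
-- 		prefix -= 2
-- ===== SOURCE B (Python) =====
-- def find_prefix4(current_position, data):
--     # Histogram of per-entry common-prefix lengths (capped at 44), then one
--     # descending sweep with a running suffix count and strict-improvement best.
--     hist = [0] * 45
--     cp = current_position[:44]
--     for other in data:
--         L = 0
--         for a, b in zip(cp, other[:44]):
--             if a != b:
--                 break
--             L += 1
--         hist[L] += 1
--     running = hist[44]
--     best = (abs(153 - running), 44, running)
--     for p in range(42, 1, -2):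
--         running += hist[p] + hist[p + 1]
--         diff = abs(153 - running)
--         if diff < best[0]:
--             best = (diff, p, running)
--     return best[1], best[2]
-- ===== Notes on version B (the rewrite author's own statement) =====
-- stated objective: alternative
-- what changed: B computes each entry's common-prefix length once, tallies them into a 45-bucket histogram, and sweeps the thresholds 44..2 with a running suffix-sum count and strict-improvement best tracking, instead of A's re-scanning every entry element-by-element for each of the 22 prefix lengths and then doing an index-of-min pass over three parallel lists.
import Mathlib
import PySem

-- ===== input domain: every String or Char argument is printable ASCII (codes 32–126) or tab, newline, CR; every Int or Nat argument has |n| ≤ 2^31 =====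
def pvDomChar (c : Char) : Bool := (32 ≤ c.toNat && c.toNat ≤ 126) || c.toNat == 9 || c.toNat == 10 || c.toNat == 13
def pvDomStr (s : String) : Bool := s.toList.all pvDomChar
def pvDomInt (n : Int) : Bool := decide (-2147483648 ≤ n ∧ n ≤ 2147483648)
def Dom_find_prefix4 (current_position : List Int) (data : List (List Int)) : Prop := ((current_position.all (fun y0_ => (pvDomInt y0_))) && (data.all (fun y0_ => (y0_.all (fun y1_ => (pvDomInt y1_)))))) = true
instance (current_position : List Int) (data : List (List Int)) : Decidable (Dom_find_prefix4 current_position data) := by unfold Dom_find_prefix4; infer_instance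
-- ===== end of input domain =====

-- B replaces A's per-prefix rescans by one histogram of common-prefix lengths plus a
-- descending suffix-sum sweep with strict-improvement best tracking (alternative algorithm).

-- ===== PORT A =====
-- inner `for i in range(prefix)` loop of A: invariant mc = i; pyGetD is exact under Pre_
def pvMcLoop (cp o : List Int) (p i mc : Nat) : Nat :=
  if _h : i < p then
    if PySem.List.pyGetD cp (i : Int) 0 = PySem.List.pyGetD o (i : Int) 0 then
      (if p ≤ mc + 1 then mc + 1 else pvMcLoop cp o p (i + 1) (mc + 1))
    else mc
  else mc
termination_by p - i

-- `count` accumulation over data for one prefix value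
def pvCountA (cp : List Int) (data : List (List Int)) (p : Nat) : Int :=
  data.foldl (fun c o => if p ≤ pvMcLoop cp o p 0 0 then c + 1 else c) 0

-- the `while True` loop, with the three accumulated lists
def pvALoop (cp : List Int) (data : List (List Int)) (p : Nat)
    (pres counts difs : List Int) : Int × Int :=
  let count := pvCountA cp data p
  let pres' := pres ++ [(p : Int)]
  let counts' := counts ++ [count]
  let difs' := difs ++ [|153 - count|]
  if _h : p ≤ 2 then
    let m := (PySem.List.min? difs' (fun x => x)).getD 0
    let idx := (PySem.List.index? difs' m).getD 0
    (pres'.getD idx 0, counts'.getD idx 0)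
  else pvALoop cp data (p - 2) pres' counts' difs'
termination_by p

def find_prefix4 (current_position : List Int) (data : List (List Int)) : Int × Int :=
  pvALoop current_position data 44 [] [] []

-- ===== PORT B =====
-- leading-common-prefix length of two lists (B's zip loop)
def pvLrun : List Int → List Int → Nat
  | a :: as, b :: bs => if a ≠ b then 0 else pvLrun as bs + 1
  | _, _ => 0

-- histogram of capped prefix lengths
def pvHist (cp : List Int) (data : List (List Int)) : List Int :=
  data.foldl
    (fun h o =>
      let L := pvLrun (cp.take 44) (o.take 44)
      h.set L (h.getD L 0 + 1))
    (List.replicate 45 (0 : Int))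

-- one sweep step: add two buckets to the running suffix count, update the best triple
def pvBStep (hist : List Int) (st : Int × Int × Int × Int) (p : Int) : Int × Int × Int × Int :=
  let running := st.1 + PySem.List.pyGetD hist p 0 + PySem.List.pyGetD hist (p + 1) 0
  let diff := |153 - running|
  (running, if diff < st.2.1 then (diff, p, running) else st.2)

def find_prefix4_alt (current_position : List Int) (data : List (List Int)) : Int × Int :=
  let hist := pvHist current_position data
  let r0 := PySem.List.pyGetD hist 44 0
  let res := (PySem.List.pyRange 42 1 (-2)).foldl (pvBStep hist) (r0, |153 - r0|, 44, r0)
  (res.2.2.1, res.2.2.2)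

-- ===== PRECONDITION & SPEC =====
-- Pre_ excludes exactly the inputs on which A raises IndexError: an entry that agrees
-- with current_position on the whole zipped overlap while either list is shorter than 44.
def Pre_find_prefix4 (current_position : List Int) (data : List (List Int)) : Prop :=
  ∀ o ∈ data, (44 ≤ current_position.length ∧ 44 ≤ o.length) ∨
    ∃ ab ∈ current_position.zip o, ab.1 ≠ ab.2
instance (current_position : List Int) (data : List (List Int)) : Decidable (Pre_find_prefix4 current_position data) := by unfold Pre_find_prefix4; infer_instance

def pvWitness_find_prefix4 : List Int × List (List Int) := ([1], [[2], [0, 5]])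

def Spec_find_prefix4 (current_position : List Int) (data : List (List Int)) (out : Int × Int) : Prop := out = find_prefix4_alt current_position data
instance (current_position : List Int) (data : List (List Int)) (out : Int × Int) : Decidable (Spec_find_prefix4 current_position data out) := by unfold Spec_find_prefix4; infer_instance

-- ===== CLAIM (what is proved, stated in full; the proofs are below) =====
def Claim_equal_find_prefix4 : Prop := ∀ (current_position : List Int) (data : List (List Int)), Dom_find_prefix4 current_position data → Pre_find_prefix4 current_position data → Spec_find_prefix4 current_position data (find_prefix4 current_position data)

-- ===== LEMMAS AND PROOFS =====

-- proof-side abbreviations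
def pvK (cp o : List Int) : Nat := pvLrun (cp.take 44) (o.take 44)
def pvF (c : Int) : Int := |153 - c|
def pvCnt (cp : List Int) (data : List (List Int)) (pn : Nat) : Int :=
  (data.countP (fun o => decide (pn ≤ pvK cp o)) : Int)
def pvPsFrom (p : Int) : Nat → List Int
  | 0 => []
  | k + 1 => p :: pvPsFrom (p - 2) k
def pvPrefA : Nat → List Int
  | 0 => [(0 : Int)]
  | 1 => [(1 : Int)]
  | 2 => [(2 : Int)]
  | p + 3 => ((p + 3 : Nat) : Int) :: pvPrefA (p + 1)
def pvSelT : List (Int × Int) → (Int × Int × Int) → (Int × Int × Int)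
  | [], b => b
  | x :: t, b => pvSelT t (if pvF x.2 < b.1 then (pvF x.2, x.1, x.2) else b)
def pvFinSel3 (ps cs ds : List Int) : Int × Int :=
  let m := (PySem.List.min? ds (fun x => x)).getD 0
  let idx := (PySem.List.index? ds m).getD 0
  (ps.getD idx 0, cs.getD idx 0)
def pvFinSelP (l : List (Int × Int)) : Int × Int :=
  pvFinSel3 (l.map (·.1)) (l.map (·.2)) (l.map (fun x => pvF x.2))

-- characterisation of pvLrun
theorem pvLrun_char : ∀ (as bs : List Int) (p : Nat),
    p ≤ pvLrun as bs ↔ p ≤ as.length ∧ p ≤ bs.length ∧ ∀ j < p, as.getD j 0 = bs.getD j 0 := by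
  intro as
  induction as with
  | nil =>
    intro bs p
    constructor
    · intro h
      have : p = 0 := by simpa [pvLrun] using h
      subst this
      exact ⟨Nat.le_refl 0, Nat.zero_le _, by omega⟩
    · intro ⟨h1, _, _⟩
      simpa [pvLrun] using h1
  | cons a as ih =>
    intro bs p
    cases bs with
    | nil =>
      constructor
      · intro h
        have : p = 0 := by
          cases as <;> simpa [pvLrun] using h
        subst this
        exact ⟨Nat.zero_le _, Nat.le_refl 0, by omega⟩
      · intro ⟨_, h2, _⟩
        simp at h2
        have : p = 0 := by omega
        subst this
        exact Nat.zero_le _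
    | cons b bs =>
      by_cases hab : a = b
      · subst hab
        have hrun : pvLrun (a :: as) (a :: bs) = pvLrun as bs + 1 := by simp [pvLrun]
        cases p with
        | zero => simp [hrun]
        | succ q =>
          rw [hrun]
          constructor
          · intro h
            have hq : q ≤ pvLrun as bs := by omega
            obtain ⟨h1, h2, h3⟩ := (ih bs q).mp hq
            refine ⟨by simpa using Nat.succ_le_succ h1, by simpa using Nat.succ_le_succ h2, ?_⟩
            intro j hj
            cases j with
            | zero => simp
            | succ i => simpa using h3 i (by omega)
          · intro ⟨h1, h2, h3⟩
            have hq : q ≤ pvLrun as bs := by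
              apply (ih bs q).mpr
              refine ⟨by simpa using h1, by simpa using h2, ?_⟩
              intro i hi
              simpa using h3 (i + 1) (by omega)
            omega
      · have hrun : pvLrun (a :: as) (b :: bs) = 0 := by simp [pvLrun, hab]
        rw [hrun]
        constructor
        · intro h
          have : p = 0 := by omega
          subst this
          exact ⟨Nat.zero_le _, Nat.zero_le _, by omega⟩
        · intro ⟨_, _, h3⟩
          by_contra hp
          have hp1 : 1 ≤ p := by omega
          have := h3 0 (by omega)
          simp at this
          exact hab this

theorem pvLrun_le_left (as bs : List Int) : pvLrun as bs ≤ as.length := by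
  exact ((pvLrun_char as bs (pvLrun as bs)).mp (Nat.le_refl _)).1

theorem pvK_le_44 (cp o : List Int) : pvK cp o ≤ 44 := by
  have h := pvLrun_le_left (cp.take 44) (o.take 44)
  have : (cp.take 44).length ≤ 44 := by simp
  exact Nat.le_trans h this

-- characterisation of A's inner loop (invariant mc = i)
theorem pvMcLoop_char (cp o : List Int) (p i : Nat) :
    p ≤ pvMcLoop cp o p i i ↔
      ∀ j, i ≤ j → j < p →
        PySem.List.pyGetD cp (j : Int) 0 = PySem.List.pyGetD o (j : Int) 0 := by
  rw [pvMcLoop]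
  by_cases h : i < p
  · rw [dif_pos h]
    by_cases heq : PySem.List.pyGetD cp (i : Int) 0 = PySem.List.pyGetD o (i : Int) 0
    · rw [if_pos heq]
      by_cases hp : p ≤ i + 1
      · rw [if_pos hp]
        have hpi : p = i + 1 := by omega
        subst hpi
        constructor
        · intro _ j h1 h2
          have : j = i := by omega
          subst this
          exact heq
        · intro _
          exact Nat.le_refl _
      · rw [if_neg hp]
        rw [pvMcLoop_char cp o p (i + 1)]
        constructor
        · intro hj j h1 h2
          rcases Nat.eq_or_lt_of_le h1 with he | hl
          · subst he; exact heq
          · exact hj j hl h2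
        · intro hj j h1 h2
          exact hj j (by omega) h2
    · rw [if_neg heq]
      constructor
      · intro hip
        omega
      · intro hall
        exact absurd (hall i (Nat.le_refl i) h) heq
  · rw [dif_neg h]
    constructor
    · intro _ j h1 h2
      omega
    · intro _
      omega
termination_by p - i

theorem getD_take (xs : List Int) (n j : Nat) (h : j < n) :
    (xs.take n).getD j 0 = xs.getD j 0 := by
  simp [List.getD, h]

-- under the per-entry precondition, A's match test is a threshold on pvK
theorem pvMc_iff_K (cp o : List Int)
    (hpre : (44 ≤ cp.length ∧ 44 ≤ o.length) ∨ ∃ ab ∈ cp.zip o, ab.1 ≠ ab.2)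
    (p : Nat) (hp1 : 1 ≤ p) (hp44 : p ≤ 44) :
    (p ≤ pvMcLoop cp o p 0 0 ↔ p ≤ pvK cp o) := by
  rw [pvMcLoop_char]
  have hgd : ∀ j : Nat,
      (PySem.List.pyGetD cp (j : Int) 0 = PySem.List.pyGetD o (j : Int) 0)
        ↔ cp.getD j 0 = o.getD j 0 := by
    intro j
    rw [PySem.List.pyGetD_natCast, PySem.List.pyGetD_natCast]
  have hK : p ≤ pvK cp o ↔
      p ≤ cp.length ∧ p ≤ o.length ∧ ∀ j < p, cp.getD j 0 = o.getD j 0 := by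
    unfold pvK
    rw [pvLrun_char]
    constructor
    · intro ⟨h1, h2, h3⟩
      simp only [List.length_take] at h1 h2
      refine ⟨by omega, by omega, ?_⟩
      intro j hj
      have := h3 j hj
      rwa [getD_take cp 44 j (by omega), getD_take o 44 j (by omega)] at this
    · intro ⟨h1, h2, h3⟩
      simp only [List.length_take]
      refine ⟨by omega, by omega, ?_⟩
      intro j hj
      rw [getD_take cp 44 j (by omega), getD_take o 44 j (by omega)]
      exact h3 j hj
  rw [hK]
  constructor
  · intro hall
    have h3 : ∀ j < p, cp.getD j 0 = o.getD j 0 := by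
      intro j hj
      exact (hgd j).mp (hall j (Nat.zero_le j) hj)
    refine ⟨?_, ?_, h3⟩ <;> {
      rcases hpre with ⟨hc, ho⟩ | ⟨ab, hmem, hne⟩
      · omega
      · obtain ⟨k, hk, hget⟩ := List.getElem_of_mem hmem
        rw [List.getElem_zip] at hget
        have hkc : k < cp.length := by
          have := hk; rw [List.length_zip] at this; omega
        have hko : k < o.length := by
          have := hk; rw [List.length_zip] at this; omega
        rw [← hget] at hne
        simp only [ne_eq] at hne
        have hne' : cp.getD k 0 ≠ o.getD k 0 := by
          rw [List.getD_eq_getElem cp 0 hkc, List.getD_eq_getElem o 0 hko]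
          exact hne
        have hkp : ¬ k < p := fun hkp => hne' (h3 k hkp)
        omega
    }
  · intro ⟨h1, h2, h3⟩ j _ hj
    exact (hgd j).mpr (h3 j hj)

theorem pvCountA_eq (cp : List Int) (data : List (List Int))
    (hpre : Pre_find_prefix4 cp data) (p : Nat) (hp1 : 1 ≤ p) (hp44 : p ≤ 44) :
    pvCountA cp data p = pvCnt cp data p := by
  unfold pvCountA pvCnt
  have congrF : ∀ (l : List (List Int)),
      (∀ o ∈ l, (p ≤ pvMcLoop cp o p 0 0 ↔ p ≤ pvK cp o)) →
      ∀ a : Int,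
        l.foldl (fun c o => if p ≤ pvMcLoop cp o p 0 0 then c + 1 else c) a
          = l.foldl (fun c o => if p ≤ pvK cp o then c + 1 else c) a := by
    intro l
    induction l with
    | nil => intro _ a; rfl
    | cons x l ihl =>
      intro hmem a
      simp only [List.foldl_cons]
      rw [if_congr (hmem x (List.mem_cons_self)) rfl rfl]
      exact ihl (fun o ho => hmem o (List.mem_cons_of_mem x ho)) _
  rw [congrF data (fun o ho => pvMc_iff_K cp o (hpre o ho) p hp1 hp44) 0]
  have hstep : ∀ (l : List (List Int)) (a : Int),
      l.foldl (fun (c : Int) o => if p ≤ pvK cp o then c + 1 else c) a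
        = a + (l.countP (fun o => decide (p ≤ pvK cp o)) : Int) := by
    intro l
    induction l with
    | nil => intro a; simp
    | cons x l ihl =>
      intro a
      simp only [List.foldl_cons, List.countP_cons, ihl]
      by_cases hx : p ≤ pvK cp x
      · simp only [hx, decide_true, if_true]
        push_cast
        ring
      · simp only [hx, decide_false, if_false]
        push_cast
        ring
  rw [hstep]
  simp

-- histogram correctness
theorem getD_set_self (h : List Int) (i : Nat) (v : Int) (hi : i < h.length) :
    (h.set i v).getD i 0 = v := by
  simp [List.getD, List.getElem?_set, hi]

theorem getD_set_ne (h : List Int) (i j : Nat) (v : Int) (hij : i ≠ j) :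
    (h.set i v).getD j 0 = h.getD j 0 := by
  simp [List.getD, List.getElem?_set, hij]

theorem pvHist_getD (cp : List Int) (data : List (List Int)) (j : Nat) (hj : j < 45) :
    (pvHist cp data).getD j 0 = (data.countP (fun o => decide (pvK cp o = j)) : Int) := by
  unfold pvHist
  have aux : ∀ (l : List (List Int)) (h : List Int), h.length = 45 →
      (l.foldl
        (fun h o =>
          let L := pvLrun (cp.take 44) (o.take 44)
          h.set L (h.getD L 0 + 1)) h).getD j 0
        = h.getD j 0 + (l.countP (fun o => decide (pvK cp o = j)) : Int) := by
    intro l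
    induction l with
    | nil => intro h _; simp
    | cons o l ihl =>
      intro h hlen
      simp only [List.foldl_cons]
      have hL : pvLrun (cp.take 44) (o.take 44) = pvK cp o := rfl
      have hlen' : (h.set (pvLrun (cp.take 44) (o.take 44))
          (h.getD (pvLrun (cp.take 44) (o.take 44)) 0 + 1)).length = 45 := by
        simpa using hlen
      rw [ihl _ hlen']
      simp only [List.countP_cons]
      by_cases hKo : pvK cp o = j
      · have hset : (h.set (pvLrun (cp.take 44) (o.take 44))
            (h.getD (pvLrun (cp.take 44) (o.take 44)) 0 + 1)).getD j 0
              = h.getD j 0 + 1 := by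
          rw [hL, hKo]
          exact getD_set_self h j _ (by omega)
        rw [hset]
        simp only [hKo, decide_true, if_true]
        push_cast
        ring
      · have hset : (h.set (pvLrun (cp.take 44) (o.take 44))
            (h.getD (pvLrun (cp.take 44) (o.take 44)) 0 + 1)).getD j 0
              = h.getD j 0 := by
          rw [hL]
          exact getD_set_ne h _ j _ hKo
        rw [hset]
        simp only [hKo, decide_false, if_false]
        push_cast
        ring
  rw [aux data (List.replicate 45 0) (by simp)]
  have hrep : (List.replicate 45 (0 : Int)).getD j 0 = 0 := by
    rw [List.getD_eq_getElem _ _ (by simpa using hj)]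
    exact List.getElem_replicate _
  rw [hrep]
  ring

theorem pvCnt_step (cp : List Int) (data : List (List Int)) (pn : Nat) :
    pvCnt cp data pn =
      pvCnt cp data (pn + 2)
        + (data.countP (fun o => decide (pvK cp o = pn + 1)) : Int)
        + (data.countP (fun o => decide (pvK cp o = pn)) : Int) := by
  unfold pvCnt
  induction data with
  | nil => simp
  | cons o data ih =>
    simp only [List.countP_cons]
    push_cast
    split_ifs <;> simp_all <;> omega

theorem pvCnt_44 (cp : List Int) (data : List (List Int)) :
    pvCnt cp data 44 = (data.countP (fun o => decide (pvK cp o = 44)) : Int) := by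
  unfold pvCnt
  congr 1
  apply List.countP_congr
  intro o _
  have := pvK_le_44 cp o
  simp only [decide_eq_true_eq]
  omega

theorem pvRun_step (cp : List Int) (data : List (List Int)) (pn : Nat) (h : pn + 2 ≤ 44) :
    pvCnt cp data (pn + 2) + (pvHist cp data).getD pn 0 + (pvHist cp data).getD (pn + 1) 0
      = pvCnt cp data pn := by
  rw [pvHist_getD cp data pn (by omega), pvHist_getD cp data (pn + 1) (by omega),
    pvCnt_step cp data pn]
  ring

-- foldl-min helpers
theorem foldl_min_shift : ∀ (t : List Int) (x y : Int), t.foldl min (min x y) = min x (t.foldl min y) := by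
  intro t
  induction t with
  | nil => intro x y; rfl
  | cons z t ih =>
    intro x y
    have : min (min x y) z = min x (min y z) := (min_assoc x y z)
    simp only [List.foldl_cons, this, ih]
theorem foldl_min_le_init : ∀ (t : List Int) (a : Int), t.foldl min a ≤ a := by
  intro t
  induction t with
  | nil => intro a; exact le_refl a
  | cons z t ih =>
    intro a
    simp only [List.foldl_cons]
    exact le_trans (ih (min a z)) (min_le_left a z)
theorem foldl_min_le_mem : ∀ (t : List Int) (a y : Int), y ∈ t → t.foldl min a ≤ y := by
  intro t
  induction t with
  | nil => intro a y hy; simp at hy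
  | cons z t ih =>
    intro a y hy
    simp only [List.foldl_cons]
    rcases List.mem_cons.mp hy with h | h
    · subst h
      exact le_trans (foldl_min_le_init t (min a y)) (min_le_right a y)
    · exact ih (min a z) y h
theorem foldl_min_mem_or : ∀ (t : List Int) (a : Int), t.foldl min a = a ∨ t.foldl min a ∈ t := by
  intro t
  induction t with
  | nil => intro a; exact Or.inl rfl
  | cons z t ih =>
    intro a
    simp only [List.foldl_cons]
    rcases ih (min a z) with h | h
    · rcases le_total a z with hle | hle
      · rw [h, min_eq_left hle]; exact Or.inl rfl
      · rw [h, min_eq_right hle]; exact Or.inr (List.mem_cons_self)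
    · exact Or.inr (List.mem_cons_of_mem z h)

-- literal evaluations of the two prefix chains
theorem pvPrefA_eq (p : Nat) :
    pvPrefA p = if p ≤ 2 then [(p : Int)] else (p : Int) :: pvPrefA (p - 2) := by
  match p with
  | 0 => rfl
  | 1 => rfl
  | 2 => rfl
  | p + 3 =>
    have h : ¬ (p + 3 ≤ 2) := by omega
    rw [if_neg h]
    have h2 : p + 3 - 2 = p + 1 := by omega
    rw [h2, pvPrefA]

theorem pvPrefA_44 : pvPrefA 44 = 44 :: pvPsFrom 42 21 := by decide
theorem pyRange_42 : PySem.List.pyRange 42 1 (-2) = pvPsFrom 42 21 := by decide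

-- `first index of min` selection, peeled one element at a time
theorem pvFinSelP_cons (x : Int × Int) (t : List (Int × Int)) :
    pvFinSelP (x :: t) = if ∀ y ∈ t, pvF x.2 ≤ pvF y.2 then (x.1, x.2) else pvFinSelP t := by
  cases t with
  | nil =>
    simp [pvFinSelP, pvFinSel3, PySem.List.min?_id_cons, PySem.List.index?_cons_self]
  | cons x' t' =>
    have hm : PySem.List.min?
        ((x :: x' :: t').map (fun y => pvF y.2)) (fun y => y)
          = some (((x' :: t').map (fun y => pvF y.2)).foldl min (pvF x.2)) := by
      rw [List.map_cons]
      exact PySem.List.min?_id_cons _ _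
    have hm' : PySem.List.min?
        ((x' :: t').map (fun y => pvF y.2)) (fun y => y)
          = some ((t'.map (fun y => pvF y.2)).foldl min (pvF x'.2)) := by
      rw [List.map_cons]
      exact PySem.List.min?_id_cons _ _
    set m' := (t'.map (fun y => pvF y.2)).foldl min (pvF x'.2) with hm'def
    have hsplit : ((x' :: t').map (fun y => pvF y.2)).foldl min (pvF x.2)
        = min (pvF x.2) m' := by
      rw [List.map_cons, List.foldl_cons, ← foldl_min_shift]
    have hm'mem : m' ∈ (x' :: t').map (fun y => pvF y.2) := by
      rcases foldl_min_mem_or (t'.map (fun y => pvF y.2)) (pvF x'.2) with h | h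
      · rw [List.map_cons, hm'def, h]; exact List.mem_cons_self
      · rw [List.map_cons]; exact List.mem_cons_of_mem _ h
    have hm'le : ∀ y ∈ x' :: t', m' ≤ pvF y.2 := by
      intro y hy
      rcases List.mem_cons.mp hy with h | h
      · subst h; exact foldl_min_le_init _ _
      · exact foldl_min_le_mem _ _ _ (List.mem_map_of_mem h)
    by_cases hcond : ∀ y ∈ x' :: t', pvF x.2 ≤ pvF y.2
    · rw [if_pos hcond]
      have hfxm : min (pvF x.2) m' = pvF x.2 := by
        apply min_eq_left
        obtain ⟨y, hy, hyeq⟩ := List.mem_map.mp hm'mem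
        rw [← hyeq]
        exact hcond y hy
      show pvFinSelP (x :: x' :: t') = (x.1, x.2)
      unfold pvFinSelP pvFinSel3
      rw [hm, hsplit, hfxm]
      simp only [Option.getD_some, List.map_cons]
      rw [PySem.List.index?_cons_self]
      simp
    · rw [if_neg hcond]
      push_neg at hcond
      obtain ⟨y0, hy0, hy0lt⟩ := hcond
      have hm'lt : m' < pvF x.2 := lt_of_le_of_lt (hm'le y0 hy0) hy0lt
      have hminm : min (pvF x.2) m' = m' := min_eq_right (le_of_lt hm'lt)
      have hne : pvF x.2 ≠ m' := ne_of_gt hm'lt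
      obtain ⟨jj, hjj⟩ := Option.isSome_iff_exists.mp
        ((PySem.List.index?_isSome_iff _ _).mpr hm'mem)
      unfold pvFinSelP pvFinSel3
      rw [hm, hm', hsplit, hminm]
      simp only [Option.getD_some, List.map_cons] at hjj ⊢
      rw [PySem.List.index?_cons_of_ne (pvF x'.2 :: t'.map (fun y => pvF y.2)) hne, hjj]
      simp only [Option.map_some, Option.getD_some]
      rw [List.getD_cons_succ, List.getD_cons_succ]

-- B's strict-improvement fold computes the same first-minimum selection
theorem pvSelT_spec : ∀ (t : List (Int × Int)) (d bp bc : Int),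
    ((pvSelT t (d, bp, bc)).2.1, (pvSelT t (d, bp, bc)).2.2)
      = if ∀ y ∈ t, d ≤ pvF y.2 then (bp, bc) else pvFinSelP t := by
  intro t
  induction t with
  | nil => intro d bp bc; simp [pvSelT]
  | cons y t ih =>
    intro d bp bc
    simp only [pvSelT]
    by_cases hy : pvF y.2 < d
    · rw [if_pos hy]
      rw [ih (pvF y.2) y.1 y.2]
      have hcond : ¬ ∀ z ∈ y :: t, d ≤ pvF z.2 := by
        intro hall
        exact absurd (hall y List.mem_cons_self) (by omega)
      rw [if_neg hcond, pvFinSelP_cons]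
    · rw [if_neg hy]
      rw [ih d bp bc]
      push_neg at hy
      by_cases hall : ∀ z ∈ t, d ≤ pvF z.2
      · rw [if_pos hall, if_pos ?_]
        intro z hz
        rcases List.mem_cons.mp hz with h | h
        · subst h; exact hy
        · exact hall z h
      · rw [if_neg hall]
        have hcond : ¬ ∀ z ∈ y :: t, d ≤ pvF z.2 := by
          intro hc
          exact hall (fun z hz => hc z (List.mem_cons_of_mem y hz))
        rw [if_neg hcond, pvFinSelP_cons]
        push_neg at hall
        obtain ⟨z0, hz0, hz0lt⟩ := hall
        have : ¬ ∀ z ∈ t, pvF y.2 ≤ pvF z.2 := by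
          intro hc
          exact absurd (le_trans hy (hc z0 hz0)) (not_le.mpr hz0lt)
        rw [if_neg this]

-- B's sweep fold, generically over a descending-by-2 chain
theorem pvBFold (cp : List Int) (data : List (List Int)) :
    ∀ (k : Nat) (p : Int) (best : Int × Int × Int),
      2 ≤ p - 2 * (k : Int) + 2 → p ≤ 42 →
      (pvPsFrom p k).foldl (pvBStep (pvHist cp data)) (pvCnt cp data (p + 2).toNat, best)
        = (pvCnt cp data (p - 2 * (k : Int) + 2).toNat,
           pvSelT ((pvPsFrom p k).map (fun q => (q, pvCnt cp data q.toNat))) best) := by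
  intro k
  induction k with
  | zero =>
    intro p best _ _
    simp only [pvPsFrom, List.foldl_nil, List.map_nil, pvSelT]
    congr 2
    omega
  | succ k ih =>
    intro p best h1 h2
    have hp0 : (0 : Int) ≤ p := by omega
    have hn44 : p.toNat + 2 ≤ 44 := by omega
    have hstep : pvBStep (pvHist cp data) (pvCnt cp data (p + 2).toNat, best) p
        = (pvCnt cp data p.toNat,
            if pvF (pvCnt cp data p.toNat) < best.1 then
              (pvF (pvCnt cp data p.toNat), p, pvCnt cp data p.toNat)
            else best) := by
      unfold pvBStep pvF
      have hc3 : (p + 2).toNat = p.toNat + 2 := by omega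
      have hsum : pvCnt cp data (p + 2).toNat
          + PySem.List.pyGetD (pvHist cp data) p 0
          + PySem.List.pyGetD (pvHist cp data) (p + 1) 0
            = pvCnt cp data p.toNat := by
        have g1 : PySem.List.pyGetD (pvHist cp data) p 0
            = (pvHist cp data).getD p.toNat 0 := by
          conv_lhs => rw [show p = ((p.toNat : Nat) : Int) by omega]
          rw [PySem.List.pyGetD_natCast]
        have g2 : PySem.List.pyGetD (pvHist cp data) (p + 1) 0
            = (pvHist cp data).getD (p.toNat + 1) 0 := by
          conv_lhs => rw [show p + 1 = ((p.toNat + 1 : Nat) : Int) by omega]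
          rw [PySem.List.pyGetD_natCast]
        rw [hc3, g1, g2]
        exact pvRun_step cp data p.toNat hn44
      simp only [hsum]
    simp only [pvPsFrom, List.foldl_cons, List.map_cons]
    rw [hstep]
    have hinit : pvCnt cp data p.toNat = pvCnt cp data ((p - 2) + 2).toNat := by
      congr 1
      omega
    rw [hinit, ih (p - 2) _ (by push_cast; omega) (by omega)]
    simp only [pvSelT]
    congr 2
    omega

-- A's outer loop, unrolled
theorem pvALoop_eq (cp : List Int) (data : List (List Int)) (p : Nat) :
    ∀ (pres counts difs : List Int),
      pvALoop cp data p pres counts difs =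
        pvFinSel3 (pres ++ pvPrefA p)
          (counts ++ (pvPrefA p).map (fun q => pvCountA cp data q.toNat))
          (difs ++ (pvPrefA p).map (fun q => pvF (pvCountA cp data q.toNat))) := by
  intro pres counts difs
  rw [pvALoop, pvPrefA_eq p]
  by_cases hp : p ≤ 2
  · simp only [hp, dite_true, if_true, List.map_cons, List.map_nil]
    simp [pvFinSel3, pvF]
  · simp only [hp, dite_false, if_false, List.map_cons]
    rw [pvALoop_eq cp data (p - 2)]
    simp only [List.append_assoc, List.singleton_append]
    simp [pvF]
termination_by p
decreasing_by omega

theorem pvFinSel3_maps (ps : List Int) (c : Int → Int) :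
    pvFinSel3 ps (ps.map c) (ps.map (fun q => pvF (c q)))
      = pvFinSelP (ps.map (fun q => (q, c q))) := by
  unfold pvFinSelP
  simp [List.map_map, Function.comp_def]


theorem pvAll_eq : ∀ (cp : List Int) (data : List (List Int)),
    Pre_find_prefix4 cp data → find_prefix4 cp data = find_prefix4_alt cp data := by
  intro cp data hpre
  -- A side: unroll the while loop, switch counts to pvCnt, package as a pair-list selection
  unfold find_prefix4
  rw [pvALoop_eq cp data 44 [] [] []]
  simp only [List.nil_append]
  have hbounds : ∀ q ∈ pvPrefA 44, (2 : Int) ≤ q ∧ q ≤ 44 := by decide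
  have hmapeq : (pvPrefA 44).map (fun q => pvCountA cp data q.toNat)
      = (pvPrefA 44).map (fun q => pvCnt cp data q.toNat) := by
    apply List.map_congr_left
    intro q hq
    obtain ⟨hq1, hq2⟩ := hbounds q hq
    exact pvCountA_eq cp data hpre q.toNat (by omega) (by omega)
  have hmapeq2 : (pvPrefA 44).map (fun q => pvF (pvCountA cp data q.toNat))
      = (pvPrefA 44).map (fun q => pvF (pvCnt cp data q.toNat)) := by
    apply List.map_congr_left
    intro q hq
    obtain ⟨hq1, hq2⟩ := hbounds q hq
    rw [pvCountA_eq cp data hpre q.toNat (by omega) (by omega)]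
  rw [hmapeq, hmapeq2, pvFinSel3_maps (pvPrefA 44) (fun q => pvCnt cp data q.toNat)]
  rw [pvPrefA_44]
  simp only [List.map_cons]
  rw [pvFinSelP_cons]
  simp only [show Int.toNat 44 = 44 from by decide]
  -- B side: histogram bucket 44, then the generic sweep lemma
  unfold find_prefix4_alt
  have hr0 : PySem.List.pyGetD (pvHist cp data) 44 0 = pvCnt cp data 44 := by
    rw [show (44 : Int) = ((44 : Nat) : Int) by norm_cast, PySem.List.pyGetD_natCast,
      pvHist_getD cp data 44 (by omega), ← pvCnt_44]
  simp only [hr0, pyRange_42]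
  have hinit : pvCnt cp data 44 = pvCnt cp data ((42 : Int) + 2).toNat := by
    rw [show ((42 : Int) + 2).toNat = (44 : Nat) from by decide]
  conv_rhs => rw [hinit]
  rw [show |153 - pvCnt cp data ((42 : Int) + 2).toNat| = pvF (pvCnt cp data ((42 : Int) + 2).toNat) from rfl]
  rw [pvBFold cp data 21 42 _ (by norm_num) (by norm_num)]
  rw [pvSelT_spec]
  simp only [show ((42 : Int) + 2).toNat = 44 from by decide]
-- ===== VERDICT (by name: the statement is the Claim_ definition above) =====
theorem find_prefix4_spec : Claim_equal_find_prefix4 := by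
  intro cp data _hdom hpre
  unfold Spec_find_prefix4
  exact pvAll_eq cp data hpre
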